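-- pv_equiv track=rewrite | github.com/albertusk95/intention-to-code-lstm | experiment_01/master_code_utils.py | fetchCode
-- ===== SOURCE A (Python) =====
-- def fetchCode(code_raw_data, num_of_lines):
-- 	splittedCode = code_raw_data.split('\n')
--
-- 	# Combining some lines of code into one corresponding code
-- 	tmp_code = ''
-- 	listOfOneCode = []
-- 	counter = 0
-- 	for sc in splittedCode:
-- 		if sc != '----- ':
-- 			if counter < num_of_lines:
-- 				tmp_code += sc
-- 				counter += 1
--
-- 		else:
-- 			listOfOneCode.append(tmp_code)
-- 			tmp_code = ''
-- 			counter = 0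
--
-- 	return listOfOneCode
-- ===== SOURCE B (Python) =====
-- def fetchCode(code_raw_data, num_of_lines):
--     lines = code_raw_data.split('\n')
--     # first pass: partition lines into delimiter-terminated groups,
--     # dropping the trailing group that has no closing delimiter
--     groups = []
--     current = []
--     for line in lines:
--         if line == '----- ':
--             groups.append(current)
--             current = []
--         else:
--             current.append(line)
--     # second pass: join the first lines of each group
--     keep = max(num_of_lines, 0)
--     return [''.join(group[:keep]) for group in groups]
-- ===== Notes on version B (the rewrite author's own statement) =====
-- stated objective: alternative
-- what changed: Replaces A's single interleaved accumulate/flush loop with a tmp string and counter by a two-pass decomposition: first partition the split lines into delimiter-terminated groups (dropping the unterminated trailing group), then map each group to ''.join(group[:max(num_of_lines,0)]).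
import Mathlib
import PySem

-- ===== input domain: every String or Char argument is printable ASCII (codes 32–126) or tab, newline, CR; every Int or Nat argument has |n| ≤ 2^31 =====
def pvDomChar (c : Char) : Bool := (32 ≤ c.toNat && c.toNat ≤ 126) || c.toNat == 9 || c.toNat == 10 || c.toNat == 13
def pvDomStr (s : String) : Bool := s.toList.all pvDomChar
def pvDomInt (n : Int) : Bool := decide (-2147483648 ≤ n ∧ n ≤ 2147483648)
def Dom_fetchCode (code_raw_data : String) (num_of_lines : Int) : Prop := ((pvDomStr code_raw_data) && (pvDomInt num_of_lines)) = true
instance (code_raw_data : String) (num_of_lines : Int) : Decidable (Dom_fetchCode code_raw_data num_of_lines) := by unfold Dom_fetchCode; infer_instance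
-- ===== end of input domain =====

-- B re-groups the lines in two passes (partition into delimiter-terminated groups, then join
-- each group's first max(num_of_lines,0) lines) instead of A's single interleaved
-- accumulate/flush loop with a counter; objective: alternative decomposition, same cost.


-- ===== PORT A =====
-- literal port of A: one fold over the split lines with state (tmp_code, listOfOneCode, counter)
def fetchCode (code_raw_data : String) (num_of_lines : Int) : List String :=
  let splittedCode := (PySem.Str.split? code_raw_data "\n").getD []   -- sep "\n" ≠ "": split? is always some
  let st := splittedCode.foldl
    (fun (st : String × List String × Int) sc =>
      if sc ≠ "----- " then
        if st.2.2 < num_of_lines then (st.1 ++ sc, st.2.1, st.2.2 + 1) else st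
      else ("", st.2.1 ++ [st.1], 0))
    ("", [], 0)
  st.2.1

-- ===== PORT B =====
-- literal port of B: partition into delimiter-terminated groups, then map join over a slice
def fetchCode_alt (code_raw_data : String) (num_of_lines : Int) : List String :=
  let lines := (PySem.Str.split? code_raw_data "\n").getD []   -- sep "\n" ≠ "": split? is always some
  let st := lines.foldl
    (fun (st : List (List String) × List String) line =>
      if line == "----- " then (st.1 ++ [st.2], [])
      else (st.1, st.2 ++ [line]))
    ([], [])
  let keep := max num_of_lines 0
  st.1.map (fun group => PySem.Str.join "" (PySem.List.slice group none (some keep)))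

-- ===== PRECONDITION & SPEC =====
def Spec_fetchCode (code_raw_data : String) (num_of_lines : Int) (out : List String) : Prop := out = fetchCode_alt code_raw_data num_of_lines
instance (code_raw_data : String) (num_of_lines : Int) (out : List String) : Decidable (Spec_fetchCode code_raw_data num_of_lines out) := by unfold Spec_fetchCode; infer_instance

-- ===== CLAIM (what is proved, stated in full; the proofs are below) =====
def Claim_equal_fetchCode : Prop := ∀ (code_raw_data : String) (num_of_lines : Int), Dom_fetchCode code_raw_data num_of_lines → Spec_fetchCode code_raw_data num_of_lines (fetchCode code_raw_data num_of_lines)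

-- ===== LEMMAS AND PROOFS =====

theorem flatten_intersperse_nil {α : Type} (l : List (List α)) :
    (List.intersperse [] l).flatten = l.flatten := by
  induction l with
  | nil => rfl
  | cons a t ih =>
    cases t with
    | nil => rfl
    | cons b u =>
      simp [List.intersperse] at *
      simp [ih]

theorem join_empty_append_singleton (xs : List String) (x : String) :
    PySem.Str.join "" (xs ++ [x]) = PySem.Str.join "" xs ++ x := by
  rw [← String.toList_inj]
  simp [PySem.Str.toList_join, PySem.Chars.join, List.intercalate, flatten_intersperse_nil]

-- B's grouping fold: the groups accumulator only ever grows at the back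
theorem groupsFold_acc (lines : List String) (gs : List (List String)) (g : List String) :
    (lines.foldl
      (fun (st : List (List String) × List String) line =>
        if line == "----- " then (st.1 ++ [st.2], [])
        else (st.1, st.2 ++ [line]))
      (gs, g)).1
    = gs ++ (lines.foldl
      (fun (st : List (List String) × List String) line =>
        if line == "----- " then (st.1 ++ [st.2], [])
        else (st.1, st.2 ++ [line]))
      ([], g)).1 := by
  induction lines generalizing gs g with
  | nil => simp
  | cons ln t ih =>
    by_cases h : ln = "----- "
    · simp only [List.foldl_cons, h, BEq.rfl, ite_true, List.nil_append]
      rw [ih [g] [], ih (gs ++ [g]) []]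
      simp
    · have hb : (ln == "----- ") = false := by simp [h]
      simp only [List.foldl_cons, hb, ite_false, List.nil_append, Bool.false_eq_true]
      exact ih gs (g ++ [ln])

-- the heart of the proof: A's interleaved fold equals B's grouping fold followed by the map,
-- with the current group g abstracted: A's tmp_code is the join of the first keep lines of g
-- and A's counter is min |g| keep.
theorem main_fold (n : Int) (lines : List String) (g : List String) (lst : List String) :
    (lines.foldl
      (fun (st : String × List String × Int) sc =>
        if sc ≠ "----- " then
          if st.2.2 < n then (st.1 ++ sc, st.2.1, st.2.2 + 1) else st
        else ("", st.2.1 ++ [st.1], 0))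
      (PySem.Str.join "" (g.take (max n 0).toNat), lst,
        ((min g.length (max n 0).toNat : Nat) : Int))).2.1
    = lst ++ ((lines.foldl
        (fun (st : List (List String) × List String) line =>
          if line == "----- " then (st.1 ++ [st.2], [])
          else (st.1, st.2 ++ [line]))
        ([], g)).1).map
          (fun grp => PySem.Str.join "" (grp.take (max n 0).toNat)) := by
  induction lines generalizing g lst with
  | nil => simp
  | cons ln t ih =>
    by_cases h : ln = "----- "
    · simp only [List.foldl_cons, h, ne_eq, not_true_eq_false, ite_false, BEq.rfl,
        ite_true, List.nil_append]
      have h0 : PySem.Str.join "" (([] : List String).take (max n 0).toNat) = "" := by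
        simp [PySem.Str.join, PySem.Chars.join, List.intercalate]
      have hmain := ih ([] : List String) (lst ++ [PySem.Str.join "" (g.take (max n 0).toNat)])
      simp only [List.length_nil, Nat.zero_min, Nat.cast_zero, h0] at hmain
      rw [hmain, groupsFold_acc t [g] []]
      simp
    · have hb : (ln == "----- ") = false := by simp [h]
      have hcnt : (((min g.length (max n 0).toNat : Nat) : Int) < n) ↔
          g.length < (max n 0).toNat := by omega
      simp only [List.foldl_cons, h, ne_eq, not_false_eq_true, ite_true, hb,
        ite_false, Bool.false_eq_true]
      by_cases hlt : g.length < (max n 0).toNat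
      · rw [if_pos (hcnt.mpr hlt)]
        have htake : (g ++ [ln]).take (max n 0).toNat = g ++ [ln] := by
          apply List.take_of_length_le; simp; omega
        have htake' : g.take (max n 0).toNat = g := List.take_of_length_le (by omega)
        have hj : PySem.Str.join "" (g.take (max n 0).toNat) ++ ln
            = PySem.Str.join "" ((g ++ [ln]).take (max n 0).toNat) := by
          rw [htake, htake', join_empty_append_singleton]
        have hc : ((min g.length (max n 0).toNat : Nat) : Int) + 1
            = ((min (g ++ [ln]).length (max n 0).toNat : Nat) : Int) := by
          simp only [List.length_append, List.length_cons, List.length_nil]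
          omega
        rw [hj, hc, ih (g ++ [ln]) lst]
      · rw [if_neg (fun hh => hlt (hcnt.mp hh))]
        have htake : (g ++ [ln]).take (max n 0).toNat = g.take (max n 0).toNat :=
          List.take_append_of_le_length (by omega)
        have hc : ((min g.length (max n 0).toNat : Nat) : Int)
            = ((min (g ++ [ln]).length (max n 0).toNat : Nat) : Int) := by
          simp only [List.length_append, List.length_cons, List.length_nil]
          omega
        rw [hc]
        have hmain := ih (g ++ [ln]) lst
        rw [htake] at hmain
        rw [hmain]

-- ===== VERDICT (by name: the statement is the Claim_ definition above) =====
theorem fetchCode_spec : Claim_equal_fetchCode := by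
  intro s n _
  unfold Spec_fetchCode fetchCode fetchCode_alt
  have h := main_fold n ((PySem.Str.split? s "\n").getD []) [] []
  simp only [List.take_nil, List.length_nil, Nat.zero_min, Nat.cast_zero] at h
  have hj : PySem.Str.join "" ([] : List String) = "" := rfl
  rw [hj] at h
  simp only [h, List.nil_append]
  congr 1
  funext grp
  rw [PySem.List.slice_to grp (le_max_right n 0)]
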